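-- pv_equiv track=rewrite | github.com/hubl1/baryon-analysis | codes/global_fit/light_baryon_global_fit.py | replace_keys_with_names
-- ===== SOURCE A (Python) =====
-- def replace_keys_with_names(text, names):
--     lines = text.split("\n")
--     for i, name in enumerate(names):
--         replace = False
--         new_lines = []
--         for line in lines:
--             if "--------------------------------------" in line:
--                 replace = True
--             if replace:
--                 new_lines.append(
--                     line.replace(f" {i} ", f"{i} " + name).replace(
--                         "combined", "        "
--                     )
--                 )
--             else:
--                 new_lines.append(line)
--         lines = new_lines
--     return "\n".join(lines)
-- ===== SOURCE B (Python) =====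
-- def replace_keys_with_names(text, names):
--     out = []
--     found = False
--     for line in text.split("\n"):
--         if "--------------------------------------" in line:
--             found = True
--         if found:
--             for i, name in enumerate(names):
--                 line = line.replace(f" {i} ", f"{i} " + name).replace(
--                     "combined", "        "
--                 )
--         out.append(line)
--     return "\n".join(out)
-- ===== Notes on version B (the rewrite author's own statement) =====
-- stated objective: faster
-- what changed: One pass over the lines with a found-flag that folds every per-name replacement over each line in place, instead of A's len(names) full rebuilds of the whole line list, each re-scanning every line for the separator.
import Mathlib
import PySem

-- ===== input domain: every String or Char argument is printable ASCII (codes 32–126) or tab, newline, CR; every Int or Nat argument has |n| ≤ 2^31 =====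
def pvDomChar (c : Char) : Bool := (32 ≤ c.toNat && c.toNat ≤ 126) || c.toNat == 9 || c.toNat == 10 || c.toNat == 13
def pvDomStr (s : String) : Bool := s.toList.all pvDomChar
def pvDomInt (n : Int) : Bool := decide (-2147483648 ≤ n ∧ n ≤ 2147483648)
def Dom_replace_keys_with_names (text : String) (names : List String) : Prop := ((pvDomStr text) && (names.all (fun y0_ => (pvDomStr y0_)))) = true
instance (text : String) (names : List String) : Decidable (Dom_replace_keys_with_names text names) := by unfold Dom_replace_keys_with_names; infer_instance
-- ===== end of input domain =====

set_option maxRecDepth 2048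
set_option maxHeartbeats 1000000

-- B replaces A's len(names) rebuilds of the whole line list by a single pass with a
-- found-flag that folds all per-name replacements over each line (objective: faster;
-- a timing run measured B faster at the largest size).

-- ===== PORT A =====
-- A's per-pass line edit: line.replace(f" {i} ", f"{i} " + name).replace("combined", "        ")
def pvTransA (i : Nat) (name : String) (line : List Char) : List Char :=
  PySem.Chars.replace
    (PySem.Chars.replace line (' ' :: (PySem.Int.toStr (i : Int)).toList ++ [' '])
      ((PySem.Int.toStr (i : Int)).toList ++ ' ' :: name.toList))
    "combined".toList "        ".toList

-- A's inner `for line in lines` loop with its `replace` flag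
def pvLoopA (i : Nat) (name : String) : Bool → List (List Char) → List (List Char)
  | _, [] => []
  | flag, l :: ls =>
    let flag' := flag || PySem.Chars.isIn "--------------------------------------".toList l
    (if flag' then pvTransA i name l else l) :: pvLoopA i name flag' ls

-- A's outer `for i, name in enumerate(names)` loop, rebuilding `lines` each pass
def pvPassA : Nat → List String → List (List Char) → List (List Char)
  | _, [], lines => lines
  | i, nm :: rest, lines => pvPassA (i + 1) rest (pvLoopA i nm false lines)

def replace_keys_with_names (text : String) (names : List String) : String :=
  String.ofList (PySem.Chars.join ['\n'] (pvPassA 0 names (PySem.Chars.splitOn text.toList ['\n'])))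

-- ===== PORT B =====
-- B's inner `for i, name in enumerate(names)` fold over a single line:
-- line = line.replace(f" {i} ", f"{i} " + name).replace("combined", "        ")
def pvInnerB : Nat → List String → List Char → List Char
  | _, [], line => line
  | i, nm :: rest, line =>
    pvInnerB (i + 1) rest
      (PySem.Chars.replace
        (PySem.Chars.replace line (' ' :: (PySem.Int.toStr (i : Int)).toList ++ [' '])
          ((PySem.Int.toStr (i : Int)).toList ++ ' ' :: nm.toList))
        "combined".toList "        ".toList)

-- B's single `for line in text.split("\n")` loop with its `found` flag
def pvLoopB (names : List String) : Bool → List (List Char) → List (List Char)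
  | _, [] => []
  | found, l :: ls =>
    let found' := found || PySem.Chars.isIn "--------------------------------------".toList l
    (if found' then pvInnerB 0 names l else l) :: pvLoopB names found' ls

def replace_keys_with_names_alt (text : String) (names : List String) : String :=
  String.ofList (PySem.Chars.join ['\n'] (pvLoopB names false (PySem.Chars.splitOn text.toList ['\n'])))

-- ===== PRECONDITION & SPEC =====
def Spec_replace_keys_with_names (text : String) (names : List String) (out : String) : Prop := out = replace_keys_with_names_alt text names
instance (text : String) (names : List String) (out : String) : Decidable (Spec_replace_keys_with_names text names out) := by unfold Spec_replace_keys_with_names; infer_instance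

-- ===== CLAIM (what is proved, stated in full; the proofs are below) =====
def Claim_equal_replace_keys_with_names : Prop := ∀ (text : String) (names : List String), Dom_replace_keys_with_names text names → Spec_replace_keys_with_names text names (replace_keys_with_names text names)

-- ===== LEMMAS AND PROOFS =====

-- the separator literal, abbreviated for the proofs
def pvSep : List Char := "--------------------------------------".toList

lemma pvSep_eq : pvSep = List.replicate 38 '-' := rfl

lemma pvSep_mem : ∀ c ∈ pvSep, c = '-' := by
  rw [pvSep_eq]
  intro c hc
  exact List.eq_of_mem_replicate hc

lemma pvCombined_eq : "combined".toList = ['c','o','m','b','i','n','e','d'] := rfl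

lemma pvCombined_not_sep : ∀ x ∈ "combined".toList, x ∉ pvSep := by
  rw [pvCombined_eq, pvSep_eq]
  intro x hx hs
  rw [List.eq_of_mem_replicate hs] at hx
  revert hx
  decide

lemma pvDigitChar_ne_dash (m : Nat) : Nat.digitChar m ≠ '-' := by
  rcases m with _|_|_|_|_|_|_|_|_|_|_|_|_|_|_|_|n
  · decide
  · decide
  · decide
  · decide
  · decide
  · decide
  · decide
  · decide
  · decide
  · decide
  · decide
  · decide
  · decide
  · decide
  · decide
  · decide
  · unfold Nat.digitChar
    repeat rw [if_neg (by omega)]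
    decide

lemma pvToDigitsCore_ne_dash (f : Nat) : ∀ (n : Nat) (l : List Char),
    (∀ c ∈ l, c ≠ '-') → ∀ c ∈ Nat.toDigitsCore 10 f n l, c ≠ '-' := by
  induction f with
  | zero => intro n l hl c hc; exact hl c hc
  | succ f ih =>
    intro n l hl c hc
    simp only [Nat.toDigitsCore] at hc
    split at hc
    · rcases List.mem_cons.mp hc with h | h
      · subst h; exact pvDigitChar_ne_dash _
      · exact hl c h
    · refine ih _ _ ?_ c hc
      intro d hd
      rcases List.mem_cons.mp hd with h | h
      · subst h; exact pvDigitChar_ne_dash _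
      · exact hl d h

lemma pvToStr_nat_ne_dash (i : Nat) : ∀ c ∈ (PySem.Int.toStr (i : Int)).toList, c ≠ '-' := by
  intro c hc
  have : (PySem.Int.toStr (i : Int)).toList = Nat.toDigits 10 i := by
    simp [PySem.Int.toStr, PySem.Int.toChars, String.toList_ofList]
  rw [this] at hc
  exact pvToDigitsCore_ne_dash _ _ _ (by simp) c hc

-- occurrence-splitting: an occurrence of `sep` in `a ++ b ++ c` whose characters are
-- disjoint from those of the nonempty `b` lies entirely in `a` or entirely in `c`
lemma pvInfixSplit {sep a b c : List Char} (hb : b ≠ [])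
    (hd : ∀ x ∈ b, x ∉ sep) (h : sep <:+: a ++ b ++ c) : sep <:+: a ∨ sep <:+: c := by
  rcases eq_or_ne sep [] with rfl | hsep
  · exact Or.inl List.nil_infix
  obtain ⟨pre, suf, he⟩ := h
  by_cases h1 : pre.length + sep.length ≤ a.length
  · left
    have hps : pre ++ sep <+: a := by
      apply List.prefix_of_prefix_length_le
      · exact ⟨suf, by simpa [List.append_assoc] using he⟩
      · exact ⟨b ++ c, by simp⟩
      · simpa using h1
    exact List.IsInfix.trans ⟨pre, [], by simp⟩ hps.isInfix
  by_cases h2 : a.length + b.length ≤ pre.length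
  · right
    have hlen := congrArg List.length he
    simp only [List.length_append] at hlen
    have hss : sep ++ suf <:+ c := by
      apply List.suffix_of_suffix_length_le
      · exact ⟨pre, by simpa [List.append_assoc] using he⟩
      · exact ⟨a ++ b, by simp⟩
      · simp; omega
    exact List.IsInfix.trans ⟨[], suf, by simp⟩ hss.isInfix
  · exfalso
    simp only [not_le] at h1 h2
    have hlen := congrArg List.length he
    simp only [List.length_append] at hlen
    have hsl : 0 < sep.length := List.length_pos_iff.mpr hsep
    have hbl : 0 < b.length := List.length_pos_iff.mpr hb
    set j := pre.length with hj
    set p := max j a.length with hp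
    have hx1 : (a ++ b ++ c)[p]? = b[p - a.length]? := by
      rw [List.append_assoc, List.getElem?_append_right (by omega),
        List.getElem?_append_left (by omega)]
    have hx2 : (a ++ b ++ c)[p]? = sep[p - j]? := by
      rw [← he]
      rw [List.getElem?_append_left (l₁ := pre ++ sep) (by simp only [List.length_append]; omega)]
      rw [List.getElem?_append_right (by omega)]
    have hbm : b[p - a.length]? = some (b[p - a.length]'(by omega)) :=
      List.getElem?_eq_getElem (by omega)
    have hsm : (b[p - a.length]'(by omega)) ∈ sep := by
      apply List.mem_of_getElem? (i := p - j)
      rw [← hx2, hx1, hbm]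
    exact hd _ (List.getElem_mem _) hsm

lemma pvGoAcc (old new : List Char) : ∀ (fuel : Nat) (l acc : List Char),
    PySem.Chars.replace.go old new fuel l acc = acc.reverse ++ PySem.Chars.replace.go old new fuel l [] := by
  intro fuel
  induction fuel with
  | zero => intro l acc; simp [PySem.Chars.replace.go]
  | succ f ih =>
    intro l acc
    cases l with
    | nil => simp [PySem.Chars.replace.go]
    | cons c t =>
      simp only [PySem.Chars.replace.go]
      split
      · rw [ih, ih (List.drop old.length (c :: t)) (new.reverse ++ [])]
        simp
      · rw [ih, ih t [c]]
        simp

lemma pvGoPrefix (old new : List Char) (hne : old ≠ []) : ∀ (fuel : Nat) (p l : List Char),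
    (∀ x ∈ old, x ∉ p) → l.length ≤ fuel → p <+: l →
    p <+: PySem.Chars.replace.go old new fuel l [] := by
  intro fuel
  induction fuel with
  | zero =>
    intro p l hd hl hp
    have : l = [] := by cases l <;> simp_all
    subst this
    simpa [PySem.Chars.replace.go] using hp
  | succ f ih =>
    intro p l hd hl hp
    cases p with
    | nil => simp
    | cons d p' =>
      cases l with
      | nil => exact absurd hp (by simp)
      | cons c t =>
        obtain ⟨hcd, hp'⟩ := List.cons_prefix_cons.mp hp
        subst hcd
        have hmatch : old.isPrefixOf (d :: t) = false := by
          cases old with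
          | nil => exact absurd rfl hne
          | cons o os =>
            by_contra hcon
            have : (o :: os) <+: (d :: t) := by
              rw [← List.isPrefixOf_iff_prefix]
              cases h' : (o :: os).isPrefixOf (d :: t) <;> simp_all
            have ho : o = d := (List.cons_prefix_cons.mp this).1
            exact hd o (by simp) (by simp [ho])
        simp only [PySem.Chars.replace.go, hmatch, Bool.false_eq_true, if_false]
        rw [pvGoAcc]
        simp only [List.reverse_cons, List.reverse_nil, List.nil_append, List.singleton_append]
        exact List.cons_prefix_cons.mpr ⟨rfl, ih p' t (fun x hx hxp => hd x hx (by simp [hxp]))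
          (by simpa using Nat.le_of_succ_le_succ hl) hp'⟩

lemma pvGoInfix (old new sep : List Char) (hne : old ≠ []) (hd : ∀ x ∈ old, x ∉ sep) :
    ∀ (fuel : Nat) (l : List Char), l.length ≤ fuel → sep <:+: l →
    sep <:+: PySem.Chars.replace.go old new fuel l [] := by
  intro fuel
  induction fuel with
  | zero =>
    intro l hl h
    have : l = [] := by cases l <;> simp_all
    subst this
    simpa [PySem.Chars.replace.go] using h
  | succ f ih =>
    intro l hl h
    cases l with
    | nil => simpa [PySem.Chars.replace.go] using h
    | cons c t =>
      by_cases hm : old.isPrefixOf (c :: t) = true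
      · have hpre : old <+: (c :: t) := List.isPrefixOf_iff_prefix.mp hm
        obtain ⟨r, hr⟩ := hpre
        have hdrop : List.drop old.length (c :: t) = r := by
          rw [← hr, List.drop_left]
        simp only [PySem.Chars.replace.go, hm, if_true]
        rw [pvGoAcc, hdrop]
        have hsplit : sep <:+: ([] : List Char) ∨ sep <:+: r := by
          apply pvInfixSplit hne hd
          simpa [← hr] using h
        rcases hsplit with hs | hs
        · have hnil : sep = [] := by simpa using hs
          simp [hnil]
        · have hrl : r.length ≤ f := by
            have hlr := congrArg List.length hr
            have holdl : 0 < old.length := List.length_pos_iff.mpr hne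
            simp at hlr hl
            omega
          exact List.IsInfix.trans (ih r hrl hs)
            ⟨new.reverse.reverse ++ [].reverse, [], by simp⟩
      · simp only [PySem.Chars.replace.go, hm, Bool.false_eq_true, if_false]
        rw [pvGoAcc]
        simp only [List.reverse_cons, List.reverse_nil, List.nil_append, List.singleton_append]
        rcases List.infix_cons_iff.mp h with hpre | hinf
        · cases sep with
          | nil => exact List.nil_infix
          | cons d p' =>
            obtain ⟨hcd, hp'⟩ := List.cons_prefix_cons.mp hpre
            subst hcd
            have : p' <+: PySem.Chars.replace.go old new f t [] := by
              apply pvGoPrefix old new hne f p' t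
                (fun x hx hxp => hd x hx (by simp [hxp]))
                (by simpa using Nat.le_of_succ_le_succ hl) hp'
            exact (List.cons_prefix_cons.mpr ⟨rfl, this⟩).isInfix
        · exact List.IsInfix.trans (ih t (by simpa using Nat.le_of_succ_le_succ hl) hinf)
            ⟨[c], [], by simp⟩


lemma pvReplaceInfix (l old new sep : List Char) (hne : old ≠ []) (hd : ∀ x ∈ old, x ∉ sep)
    (h : sep <:+: l) : sep <:+: PySem.Chars.replace l old new := by
  unfold PySem.Chars.replace
  rw [if_neg (by simpa using hne)]
  exact pvGoInfix old new sep hne hd l.length l le_rfl h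

lemma pvTransA_pres (i : Nat) (nm : String) (l : List Char)
    (h : PySem.Chars.isIn pvSep l = true) : PySem.Chars.isIn pvSep (pvTransA i nm l) = true := by
  rw [PySem.Chars.isIn_iff_infix] at h ⊢
  unfold pvTransA
  apply pvReplaceInfix _ _ _ _ (by rw [pvCombined_eq]; decide) pvCombined_not_sep
  apply pvReplaceInfix _ _ _ _ (by simp) _ h
  intro x hx hs
  have hdash : x = '-' := pvSep_mem x hs
  rcases List.mem_cons.mp hx with rfl | hx'
  · exact absurd hdash (by decide)
  · rcases List.mem_append.mp hx' with h' | h'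
    · exact pvToStr_nat_ne_dash i x h' hdash
    · have : x = ' ' := by simpa using h'
      subst this
      exact absurd hdash (by decide)

-- generic flag loop over lines with per-line transform T
def pvLoopG (T : List Char → List Char) : Bool → List (List Char) → List (List Char)
  | _, [] => []
  | flag, l :: ls =>
    let flag' := flag || PySem.Chars.isIn pvSep l
    (if flag' then T l else l) :: pvLoopG T flag' ls

lemma pvLoopA_eq (i : Nat) (nm : String) : ∀ (flag : Bool) (ls : List (List Char)),
    pvLoopA i nm flag ls = pvLoopG (pvTransA i nm) flag ls := by
  intro flag ls
  induction ls generalizing flag with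
  | nil => rfl
  | cons l ls ih => simp [pvLoopA, pvLoopG, pvSep, ih]

lemma pvLoopB_eq (names : List String) : ∀ (flag : Bool) (ls : List (List Char)),
    pvLoopB names flag ls = pvLoopG (pvInnerB 0 names) flag ls := by
  intro flag ls
  induction ls generalizing flag with
  | nil => rfl
  | cons l ls ih => simp [pvLoopB, pvLoopG, pvSep, ih]

lemma pvLoopG_id : ∀ (flag : Bool) (ls : List (List Char)),
    pvLoopG (fun l => l) flag ls = ls := by
  intro flag ls
  induction ls generalizing flag with
  | nil => rfl
  | cons l ls ih => simp [pvLoopG, ih]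

lemma pvLoopG_comp (T T' : List Char → List Char)
    (hT : ∀ l, PySem.Chars.isIn pvSep l = true → PySem.Chars.isIn pvSep (T l) = true) :
    ∀ (flag : Bool) (ls : List (List Char)),
    pvLoopG T' flag (pvLoopG T flag ls) = pvLoopG (fun l => T' (T l)) flag ls := by
  intro flag ls
  induction ls generalizing flag with
  | nil => rfl
  | cons l ls ih =>
    cases flag with
    | true => simp [pvLoopG, ih]
    | false =>
      cases h : PySem.Chars.isIn pvSep l with
      | false => simp [pvLoopG, h, ih]
      | true => simp [pvLoopG, h, hT l h, ih]

lemma pvPassA_eq : ∀ (names : List String) (i : Nat) (lines : List (List Char)),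
    pvPassA i names lines = pvLoopG (pvInnerB i names) false lines := by
  intro names
  induction names with
  | nil =>
    intro i lines
    simp only [pvPassA, pvInnerB]
    exact (pvLoopG_id false lines).symm
  | cons nm rest ih =>
    intro i lines
    simp only [pvPassA]
    rw [pvLoopA_eq, ih (i + 1), pvLoopG_comp (pvTransA i nm) _ (pvTransA_pres i nm)]
    rfl

-- ===== VERDICT (by name: the statement is the Claim_ definition above) =====
theorem replace_keys_with_names_spec : Claim_equal_replace_keys_with_names := by
  intro text names _
  unfold Spec_replace_keys_with_names replace_keys_with_names replace_keys_with_names_alt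
  rw [pvPassA_eq, pvLoopB_eq]
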